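-- pv_equiv track=rewrite | github.com/storagebirddrop/jackdawsentry-graph | src/collectors/backfill.py | _ordered_chains
-- ===== SOURCE A (Python) =====
-- from typing import Any
-- from typing import Dict
-- from typing import Iterable
--
-- BACKFILL_PRIORITY = [
--     "ethereum",
--     "bitcoin",
--     "bsc",
--     "polygon",
--     "arbitrum",
--     "base",
--     "optimism",
--     "avalanche",
--     "solana",
--     "tron",
--     "xrp",
--     "starknet",
--     "injective",
--     "cosmos",
--     "sui",
-- ]
--
-- def _ordered_chains(collectors: Dict[str, Any]) -> Iterable[str]:
--     """Yield collectors ordered by bootstrap priority."""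
--     seen = set()
--     for chain in BACKFILL_PRIORITY:
--         if chain in collectors:
--             seen.add(chain)
--             yield chain
--     for chain in sorted(collectors):
--         if chain not in seen:
--             yield chain
-- ===== SOURCE B (Python) =====
-- BACKFILL_PRIORITY = [
--     "ethereum",
--     "bitcoin",
--     "bsc",
--     "polygon",
--     "arbitrum",
--     "base",
--     "optimism",
--     "avalanche",
--     "solana",
--     "tron",
--     "xrp",
--     "starknet",
--     "injective",
--     "cosmos",
--     "sui",
-- ]
--
--
-- def _ordered_chains(collectors):
--     """Yield collectors ordered by bootstrap priority."""
--     rank = {chain: i for i, chain in enumerate(BACKFILL_PRIORITY)}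
--     n = len(BACKFILL_PRIORITY)
--     yield from sorted(collectors, key=lambda c: (rank.get(c, n), c))
-- ===== Notes on version B (the rewrite author's own statement) =====
-- stated objective: simpler
-- what changed: Replaces the two-pass generator (priority scan with a seen-set, then a sorted pass skipping seen chains) with one sort under the composite key (priority rank or len(BACKFILL_PRIORITY), chain name).
import Mathlib
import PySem

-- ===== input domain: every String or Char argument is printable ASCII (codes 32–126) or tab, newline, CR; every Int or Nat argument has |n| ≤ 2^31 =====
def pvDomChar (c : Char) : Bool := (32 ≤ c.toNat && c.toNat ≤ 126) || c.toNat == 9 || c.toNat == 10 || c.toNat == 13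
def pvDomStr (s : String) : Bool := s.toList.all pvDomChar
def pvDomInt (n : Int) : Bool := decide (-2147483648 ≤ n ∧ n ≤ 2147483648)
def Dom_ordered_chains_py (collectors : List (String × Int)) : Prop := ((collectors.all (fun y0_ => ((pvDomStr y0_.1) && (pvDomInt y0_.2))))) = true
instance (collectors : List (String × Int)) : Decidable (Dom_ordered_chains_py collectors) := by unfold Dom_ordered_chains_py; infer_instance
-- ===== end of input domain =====

-- B replaces A's two-pass generator (priority scan + seen-set, then sorted remainder) with a
-- single sort under the composite key (priority rank or list length, chain name) — simpler.


-- ===== PORT A =====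
def BACKFILL_PRIORITY : List String :=
  ["ethereum", "bitcoin", "bsc", "polygon", "arbitrum", "base", "optimism", "avalanche",
   "solana", "tron", "xrp", "starknet", "injective", "cosmos", "sui"]

-- the dict argument arrives as an association list; its key list (unique keys, first-occurrence
-- order, as in the Python dict) is what 'chain in collectors' / 'sorted(collectors)' see
def pyDictKeys (collectors : List (String × Int)) : List String :=
  PySem.List.dedup (collectors.map Prod.fst)

def ordered_chains_py (collectors : List (String × Int)) : List String :=
  let keys := pyDictKeys collectors
  -- first loop: seen = set(); for chain in BACKFILL_PRIORITY: if chain in collectors: seen.add(chain); yield chain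
  let st := BACKFILL_PRIORITY.foldl
    (fun (st : PySem.Set String × List String) chain =>
      if keys.contains chain then (PySem.Set.add st.1 chain, st.2 ++ [chain]) else st)
    (PySem.Set.empty, [])
  -- second loop: for chain in sorted(collectors): if chain not in seen: yield chain
  (PySem.List.sorted keys (fun c => c) false).foldl
    (fun out chain => if PySem.Set.contains st.1 chain then out else out ++ [chain]) st.2

-- ===== PORT B =====
def ordered_chains_py_alt (collectors : List (String × Int)) : List String :=
  -- rank = {chain: i for i, chain in enumerate(BACKFILL_PRIORITY)}
  let rank : PySem.Dict String Int :=
    (PySem.List.enumerate BACKFILL_PRIORITY).foldl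
      (fun d p => d.insert p.2 p.1) PySem.Dict.empty
  let n : Int := PySem.List.len BACKFILL_PRIORITY
  -- sorted(collectors, key=lambda c: (rank.get(c, n), c))
  PySem.List.sorted2 (pyDictKeys collectors) (fun c => rank.getD c n) (fun c => c) false

-- ===== PRECONDITION & SPEC =====
def Spec_ordered_chains_py (collectors : List (String × Int)) (out : List String) : Prop := out = ordered_chains_py_alt collectors
instance (collectors : List (String × Int)) (out : List String) : Decidable (Spec_ordered_chains_py collectors out) := by unfold Spec_ordered_chains_py; infer_instance

-- ===== CLAIM (what is proved, stated in full; the proofs are below) =====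
def Claim_equal_ordered_chains_py : Prop := ∀ (collectors : List (String × Int)), Dom_ordered_chains_py collectors → Spec_ordered_chains_py collectors (ordered_chains_py collectors)

-- ===== LEMMAS AND PROOFS =====

def pvRank : PySem.Dict String Int :=
  (PySem.List.enumerate BACKFILL_PRIORITY).foldl
    (fun d p => d.insert p.2 p.1) PySem.Dict.empty

lemma pvRank_pairwise :
    BACKFILL_PRIORITY.Pairwise (fun a b => pvRank.getD a 15 < pvRank.getD b 15) := by decide

lemma pvRank_lt (a : String) (h : a ∈ BACKFILL_PRIORITY) : pvRank.getD a 15 < 15 := by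
  fin_cases h <;> decide

lemma pvRank_default (c : String) (h : c ∉ BACKFILL_PRIORITY) : pvRank.getD c 15 = 15 := by
  apply PySem.Dict.getD_of_not_contains
  rw [PySem.Dict.contains_eq_decide_mem_keys]
  have hk : pvRank.keys = BACKFILL_PRIORITY := by
    show ((PySem.List.enumerate BACKFILL_PRIORITY).foldl
      (fun d p => d.insert p.2 p.1) PySem.Dict.empty).keys = _
    rw [PySem.Dict.keys_foldl_insert_key (key := Prod.snd) (f := fun _ p => p.1)]
    decide
  simp [hk, h]

lemma sorted2_eq_sorted_lex (xs : List String) (k1 : String → Int) (k2 : String → String) :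
    PySem.List.sorted2 xs k1 k2 false
      = PySem.List.sorted xs (fun x => toLex (k1 x, k2 x)) false := by
  simp only [PySem.List.sorted2, PySem.List.sorted]
  congr 1
  funext acc a
  congr 1
  funext x y
  rcases lt_trichotomy (k1 x) (k1 y) with h | h | h
  · simp [Prod.Lex.toLex_lt_toLex, h]
  · simp [Prod.Lex.toLex_lt_toLex, h]
  · simp [Prod.Lex.toLex_lt_toLex, h, not_lt_of_gt h, (h.ne' : ¬ k1 x = k1 y)]

lemma core_eq (ks : List String) (hnd : ks.Nodup) :
    (let st := BACKFILL_PRIORITY.foldl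
        (fun (st : PySem.Set String × List String) chain =>
          if ks.contains chain then (PySem.Set.add st.1 chain, st.2 ++ [chain]) else st)
        (PySem.Set.empty, []);
      (PySem.List.sorted ks (fun c => c) false).foldl
        (fun out chain => if PySem.Set.contains st.1 chain then out else out ++ [chain]) st.2)
      = PySem.List.sorted2 ks (fun c => pvRank.getD c 15) (fun c => c) false := by
  have hsplit :
      (fun (st : PySem.Set String × List String) chain =>
          if ks.contains chain then (PySem.Set.add st.1 chain, st.2 ++ [chain]) else st)
        = (fun st chain =>
            ((fun (s : PySem.Set String) c => if ks.contains c then PySem.Set.add s c else s) st.1 chain,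
             (fun (o : List String) c => if ks.contains c then o ++ [c] else o) st.2 chain)) := by
    funext st c
    by_cases h : ks.contains c = true
    · show _ = (if ks.contains c = true then _ else _, if ks.contains c = true then _ else _)
      rw [if_pos h, if_pos h, if_pos h]
    · show _ = (if ks.contains c = true then _ else _, if ks.contains c = true then _ else _)
      rw [if_neg h, if_neg h, if_neg h]
  rw [hsplit, PySem.List.foldl_prod_mk
    (f := fun (s : PySem.Set String) c => if ks.contains c = true then PySem.Set.add s c else s)
    (g := fun (o : List String) c => if ks.contains c = true then o ++ [c] else o)]
  dsimp only
  set pri : List String := BACKFILL_PRIORITY.filter (fun c => ks.contains c) with hpri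
  have hseen : BACKFILL_PRIORITY.foldl
      (fun (s : PySem.Set String) c => if ks.contains c then PySem.Set.add s c else s) PySem.Set.empty
      = PySem.Set.ofList pri := by
    rw [PySem.List.foldl_if_eq_foldl_filter, PySem.Set.ofList_eq_foldl]; rfl
  have hout : BACKFILL_PRIORITY.foldl
      (fun (o : List String) c => if ks.contains c then o ++ [c] else o) []
      = pri := by
    rw [PySem.List.foldl_append_if_eq_filter]; rfl
  rw [hseen, hout]
  set S : List String := PySem.List.sorted ks (fun c => c) false with hSdef
  set p : String → Bool := fun c => PySem.Set.contains (PySem.Set.ofList pri) c with hp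
  have hswap : (fun (out : List String) chain => if p chain then out else out ++ [chain])
      = (fun out chain => if (!p chain) then out ++ [chain] else out) := by
    funext o c; cases h : p c <;> simp
  rw [hswap, PySem.List.foldl_append_if_eq_filter]
  set rest : List String := S.filter (fun c => !p c) with hrest
  -- membership facts
  have hmem_p : ∀ c, p c = true ↔ c ∈ pri := by
    intro c; rw [hp]; rw [PySem.Set.contains_iff, PySem.Set.mem_ofList]
  have hmem_pri : ∀ c, c ∈ pri ↔ c ∈ BACKFILL_PRIORITY ∧ c ∈ ks := by
    intro c; simp [hpri, List.mem_filter]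
  have hS_perm : S.Perm ks := PySem.List.sorted_perm ks (fun c => c) false
  have hSnd : S.Nodup := hS_perm.nodup_iff.mpr hnd
  have hBPnd : BACKFILL_PRIORITY.Nodup := by decide
  have hprind : pri.Nodup := hBPnd.filter _
  have hrest_mem : ∀ c, c ∈ rest → c ∈ ks ∧ c ∉ BACKFILL_PRIORITY := by
    intro c hc
    rw [hrest, List.mem_filter] at hc
    obtain ⟨hcS, hcp⟩ := hc
    have hcks : c ∈ ks := hS_perm.mem_iff.mp hcS
    refine ⟨hcks, fun hbp => ?_⟩
    have : c ∈ pri := (hmem_pri c).mpr ⟨hbp, hcks⟩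
    rw [Bool.not_eq_eq_eq_not, Bool.not_true] at hcp
    rw [← hmem_p c] at this
    rw [this] at hcp
    exact Bool.true_eq_false.mp hcp
  -- RHS to sorted with lex key
  rw [sorted2_eq_sorted_lex]
  -- permutation
  have hperm_fil : (S.filter p).Perm pri := by
    apply List.perm_of_nodup_nodup_toFinset_eq (hSnd.filter _) hprind
    ext c
    simp only [List.mem_toFinset, List.mem_filter]
    constructor
    · rintro ⟨-, hcp⟩; exact (hmem_p c).mp hcp
    · intro hc
      exact ⟨hS_perm.mem_iff.mpr ((hmem_pri c).mp hc).2, (hmem_p c).mpr hc⟩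
  have hperm : (pri ++ rest).Perm ks :=
    ((hperm_fil.symm.append_right rest).trans
      (by rw [hrest]; exact List.filter_append_perm p S)).trans hS_perm
  -- pairwise strict increase under the composite key
  have hpair : (pri ++ rest).Pairwise
      (fun a b => (fun c => toLex (pvRank.getD c 15, c)) a < (fun c => toLex (pvRank.getD c 15, c)) b) := by
    rw [List.pairwise_append]
    refine ⟨?_, ?_, ?_⟩
    · have h1 : pri.Pairwise (fun a b => pvRank.getD a 15 < pvRank.getD b 15) :=
        pvRank_pairwise.sublist (List.filter_sublist)
      exact h1.imp (fun h => Prod.Lex.toLex_lt_toLex.mpr (Or.inl h))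
    · have hle : rest.Pairwise (fun a b => a ≤ b) :=
        (PySem.List.sorted_pairwise ks (fun c => c)).sublist (List.filter_sublist)
      have hne : rest.Pairwise (fun a b => a ≠ b) := hSnd.filter _
      have hlt : rest.Pairwise (fun a b => a < b) :=
        (hle.and hne).imp (fun h => lt_of_le_of_ne h.1 h.2)
      refine hlt.imp_of_mem (fun ha hb h => ?_)
      refine Prod.Lex.toLex_lt_toLex.mpr (Or.inr ⟨?_, h⟩)
      rw [pvRank_default _ (hrest_mem _ ha).2, pvRank_default _ (hrest_mem _ hb).2]
    · intro a ha b hb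
      refine Prod.Lex.toLex_lt_toLex.mpr (Or.inl ?_)
      rw [pvRank_default b (hrest_mem b hb).2]
      exact pvRank_lt a ((hmem_pri a).mp ha).1
  exact (PySem.List.sorted_eq_of_perm_of_pairwise_lt ks (pri ++ rest)
    (fun c => toLex (pvRank.getD c 15, c)) hperm hpair).symm

-- ===== VERDICT (by name: the statement is the Claim_ definition above) =====
theorem ordered_chains_py_spec : Claim_equal_ordered_chains_py := by
  intro collectors _
  unfold Spec_ordered_chains_py ordered_chains_py ordered_chains_py_alt
  exact core_eq (pyDictKeys collectors)
    (by simp [pyDictKeys, PySem.List.dedup_eq_ofList, PySem.Set.nodup_ofList])
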